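-- pv_equiv track=rewrite | github.com/ksahlin/isONcorrect | scripts/collapse.py | get_kmer_maximizers
-- ===== SOURCE A (Python) =====
-- from collections import deque
--
-- def get_kmer_maximizers(seq, k_size, w_size):
--     # kmers = [seq[i:i+k_size] for i in range(len(seq)-k_size) ]
--     w = w_size - k_size
--     window_kmers = deque([seq[i:i+k_size] for i in range(w +1)])
--     curr_min = max(window_kmers)
--     minimizers = [ (curr_min, list(window_kmers).index(curr_min)) ]
--
--     for i in range(w+1,len(seq) - k_size):
--         new_kmer = seq[i:i+k_size]
--         # updateing window
--         discarded_kmer = window_kmers.popleft()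
--         window_kmers.append(new_kmer)
--
--         # we have discarded previous windows minimizer, look for new minimizer brute force
--         if curr_min == discarded_kmer:
--             curr_min = max(window_kmers)
--             minimizers.append( (curr_min, list(window_kmers).index(curr_min) + i - w ) )
--
--         # Previous minimizer still in window, we only need to compare with the recently added kmer
--         elif new_kmer > curr_min:
--             curr_min = new_kmer
--             minimizers.append( (curr_min, i) )
--
--     return minimizers
-- ===== SOURCE B (Python) =====
-- from collections import deque
--
-- def get_kmer_maximizers(seq, k_size, w_size):
--     # Monotonic deque of (kmer, index) pairs: the front is always the leftmost
--     # occurrence of the window maximum.  An output entry is emitted exactly when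
--     # the previous front slides out of the window, or when the new k-mer
--     # strictly exceeds the previous window maximum.
--     w = w_size - k_size
--     dq = deque()
--     for i in range(w + 1):
--         x = seq[i:i + k_size]
--         while dq and dq[-1][0] < x:
--             dq.pop()
--         dq.append((x, i))
--     res = [dq[0]]
--     for i in range(w + 1, len(seq) - k_size):
--         expired = dq[0][1] == i - w - 1
--         if expired:
--             dq.popleft()
--         x = seq[i:i + k_size]
--         new_max = (not expired) and x > dq[0][0]
--         while dq and dq[-1][0] < x:
--             dq.pop()
--         dq.append((x, i))
--         if expired or new_max:
--             res.append(dq[0])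
--     return res
-- ===== Notes on version B (the rewrite author's own statement) =====
-- stated objective: faster
-- what changed: Replaces the brute-force rescan of the whole window (max + list.index on every event) by a monotonic deque of (kmer, index) pairs whose front is always the leftmost occurrence of the window maximum, so each k-mer is pushed and popped at most once.
import Mathlib
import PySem

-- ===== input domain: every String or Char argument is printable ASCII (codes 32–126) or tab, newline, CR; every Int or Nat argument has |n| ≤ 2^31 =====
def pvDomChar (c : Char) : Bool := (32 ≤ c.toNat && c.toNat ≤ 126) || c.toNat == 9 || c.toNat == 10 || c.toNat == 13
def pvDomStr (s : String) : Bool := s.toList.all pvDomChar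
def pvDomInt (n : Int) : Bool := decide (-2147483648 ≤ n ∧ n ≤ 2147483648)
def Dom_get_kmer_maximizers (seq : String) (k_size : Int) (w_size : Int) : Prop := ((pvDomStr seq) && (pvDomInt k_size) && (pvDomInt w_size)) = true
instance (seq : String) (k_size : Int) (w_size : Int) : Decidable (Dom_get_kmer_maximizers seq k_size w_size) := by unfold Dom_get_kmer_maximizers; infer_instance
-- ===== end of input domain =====

-- B replaces A's brute-force window rescan (max + list.index on each event) by a monotonic
-- deque of (kmer, index) pairs whose front is the leftmost occurrence of the window maximum
-- (objective: alternative algorithm).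


-- ===== PORT A =====

-- seq[i:i+k_size]  (shared by both ports: both Pythons compute this same slice)
def pvKmer (seq : String) (k_size : Int) (i : Int) : String :=
  PySem.Str.slice seq (some i) (some (i + k_size))

def pvStepA (seq : String) (k_size : Int) (w : Int)
    (st : List String × String × List (String × Int)) (i : Int) :
    List String × String × List (String × Int) :=
  if st.2.1 == st.1.headD "" then
    match PySem.List.max? (st.1.tail ++ [pvKmer seq k_size i]) id with
    | none => (st.1.tail ++ [pvKmer seq k_size i], st.2.1, st.2.2)
    | some m =>
        (st.1.tail ++ [pvKmer seq k_size i], m,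
          st.2.2 ++ [(m, ((PySem.List.index? (st.1.tail ++ [pvKmer seq k_size i]) m).getD 0 : Int) + i - w)])
  else if st.2.1 < pvKmer seq k_size i then
    (st.1.tail ++ [pvKmer seq k_size i], pvKmer seq k_size i,
      st.2.2 ++ [(pvKmer seq k_size i, i)])
  else
    (st.1.tail ++ [pvKmer seq k_size i], st.2.1, st.2.2)

def get_kmer_maximizers (seq : String) (k_size : Int) (w_size : Int) : List (String × Int) :=
  let w := w_size - k_size
  let window := (PySem.List.pyRange 0 (w + 1)).map (pvKmer seq k_size)
  match PySem.List.max? window id with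
  | none => []    -- Python's max of the empty initial deque raises ValueError here; excluded by Pre_
  | some curr =>
      ((PySem.List.pyRange (w + 1) (PySem.Str.len seq - k_size)).foldl (pvStepA seq k_size w)
        (window, curr, [(curr, ((PySem.List.index? window curr).getD 0 : Int))])).2.2

-- ===== PORT B =====

-- The Python deque is represented back-to-front (so Python's pop/append at the right end are
-- head operations), and dq[0] — which Source B reads for the expired test, the new-max test and
-- the emitted entry — is carried alongside; it changes only on the two emit events.

-- while dq and dq[-1][0] < x: dq.pop()   (on the reversed representation)
def pvPopR (x : String) (rdq : List (String × Int)) : List (String × Int) :=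
  rdq.dropWhile (fun e => decide (e.1 < x))

-- body of the build loop: pop strictly smaller from the back, then append (x, i)
def pvBuildR (kmer : Int → String) (rdq : List (String × Int)) (i : Int) : List (String × Int) :=
  (kmer i, i) :: pvPopR (kmer i) rdq

-- loop body of B: state = (reversed deque, dq[0], res); emit iff the front expired
-- or a strictly larger k-mer arrives
def pvStepB (kmer : Int → String) (w : Int)
    (st : List (String × Int) × (String × Int) × List (String × Int)) (i : Int) :
    List (String × Int) × (String × Int) × List (String × Int) :=
  if st.2.1.2 == i - w - 1 then
    let rdq2 := (kmer i, i) :: pvPopR (kmer i) st.1.dropLast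
    let fr := rdq2.getLastD ("", 0)
    (rdq2, fr, st.2.2 ++ [fr])
  else if st.2.1.1 < kmer i then
    let rdq2 := (kmer i, i) :: pvPopR (kmer i) st.1
    let fr := rdq2.getLastD ("", 0)
    (rdq2, fr, st.2.2 ++ [fr])
  else
    ((kmer i, i) :: pvPopR (kmer i) st.1, st.2.1, st.2.2)

def get_kmer_maximizers_alt (seq : String) (k_size : Int) (w_size : Int) : List (String × Int) :=
  let w := w_size - k_size
  let kmer := pvKmer seq k_size
  let dq0 := (PySem.List.pyRange 0 (w + 1)).foldl (pvBuildR kmer) []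
  let f0 := dq0.getLastD ("", 0)
  ((PySem.List.pyRange (w + 1) (PySem.Str.len seq - k_size)).foldl (pvStepB kmer w)
      (dq0, f0, [f0])).2.2

-- ===== PRECONDITION & SPEC =====

-- Python A raises ValueError (max of the empty initial window) exactly when w_size < k_size;
-- B raises IndexError on the same inputs.  Everywhere else A returns normally.
def Pre_get_kmer_maximizers (seq : String) (k_size : Int) (w_size : Int) : Prop :=
  k_size ≤ w_size
instance (seq : String) (k_size : Int) (w_size : Int) : Decidable (Pre_get_kmer_maximizers seq k_size w_size) := by
  unfold Pre_get_kmer_maximizers; infer_instance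

def pvWitness_get_kmer_maximizers : String × Int × Int := ("abcab", 2, 4)

def Spec_get_kmer_maximizers (seq : String) (k_size : Int) (w_size : Int) (out : List (String × Int)) : Prop := out = get_kmer_maximizers_alt seq k_size w_size
instance (seq : String) (k_size : Int) (w_size : Int) (out : List (String × Int)) : Decidable (Spec_get_kmer_maximizers seq k_size w_size out) := by unfold Spec_get_kmer_maximizers; infer_instance

-- ===== CLAIM (what is proved, stated in full; the proofs are below) =====
def Claim_equal_get_kmer_maximizers : Prop := ∀ (seq : String) (k_size : Int) (w_size : Int), Dom_get_kmer_maximizers seq k_size w_size → Pre_get_kmer_maximizers seq k_size w_size → Spec_get_kmer_maximizers seq k_size w_size (get_kmer_maximizers seq k_size w_size)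

-- ===== LEMMAS AND PROOFS =====

-- forward-order mirror of the deque (proof-side only): Source B's deque in left-to-right order
def pvPop (x : String) (dq : List (String × Int)) : List (String × Int) :=
  (dq.reverse.dropWhile (fun e => decide (e.1 < x))).reverse

def pvBuild (kmer : Int → String) (dq : List (String × Int)) (i : Int) : List (String × Int) :=
  pvPop (kmer i) dq ++ [(kmer i, i)]

theorem pvPopR_reverse (x : String) (d : List (String × Int)) :
    pvPopR x d.reverse = (pvPop x d).reverse := by
  rw [pvPop, pvPopR, List.reverse_reverse]

theorem pvBuildR_reverse (kmer : Int → String) (d : List (String × Int)) (i : Int) :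
    pvBuildR kmer d.reverse i = (pvBuild kmer d i).reverse := by
  rw [pvBuild, pvBuildR, List.reverse_append, pvPopR_reverse]
  rfl

theorem pv_foldl_buildR (kmer : Int → String) (R : List Int) (init : List (String × Int)) :
    R.foldl (pvBuildR kmer) init.reverse = (R.foldl (pvBuild kmer) init).reverse := by
  induction R generalizing init with
  | nil => rfl
  | cons i R ih =>
      rw [List.foldl_cons, List.foldl_cons, pvBuildR_reverse]
      exact ih (pvBuild kmer init i)

theorem pv_getLastD_reverse (l : List (String × Int)) (d : String × Int) :
    l.reverse.getLastD d = l.headD d := by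
  rw [List.getLastD_eq_getLast?, List.getLast?_reverse, List.headD_eq_head?]

theorem pv_dropLast_reverse (l : List (String × Int)) :
    l.reverse.dropLast = l.tail.reverse := by
  cases l with
  | nil => rfl
  | cons a t => rw [List.reverse_cons, List.dropLast_concat]; rfl

theorem pvPop_cons (x : String) (a : String × Int) (t : List (String × Int)) :
    pvPop x (a :: t) =
      if pvPop x t = [] then (if a.1 < x then [] else [a]) else a :: pvPop x t := by
  show ((a :: t).reverse.dropWhile (fun e => decide (e.1 < x))).reverse = _
  rw [List.reverse_cons, List.dropWhile_append]
  by_cases h : t.reverse.dropWhile (fun e => decide (e.1 < x)) = []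
  · rw [if_pos (List.isEmpty_iff.mpr h), if_pos (by rw [pvPop, h, List.reverse_nil])]
    by_cases h2 : a.1 < x
    · rw [if_pos h2, List.dropWhile_cons, decide_eq_true h2]; simp
    · rw [if_neg h2, List.dropWhile_cons, decide_eq_false h2]; simp
  · rw [if_neg (fun hc => h (List.isEmpty_iff.mp hc)),
      if_neg (by rw [pvPop]; simpa using h), List.reverse_append]
    rfl

theorem pvPop_head (x : String) (a : String × Int) (t : List (String × Int)) (h : ¬ a.1 < x) :
    pvPop x (a :: t) = a :: pvPop x t := by
  rw [pvPop_cons]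
  by_cases h2 : pvPop x t = [] <;> simp [h2, h]

theorem pvPop_all (x : String) (d : List (String × Int)) (h : ∀ e ∈ d, e.1 < x) :
    pvPop x d = [] := by
  rw [pvPop, List.reverse_eq_nil_iff, List.dropWhile_eq_nil_iff]
  intro e he
  exact decide_eq_true (h e (List.mem_reverse.1 he))

theorem pvPop_mem (x : String) (d : List (String × Int)) (e : String × Int)
    (h : e ∈ pvPop x d) : e ∈ d := by
  rw [pvPop, List.mem_reverse] at h
  exact List.mem_reverse.1 ((List.dropWhile_sublist _).subset h)

theorem pv_max?_isSome (l : List String) (h : l ≠ []) :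
    ∃ v, PySem.List.max? l id = some v := by
  cases hm : PySem.List.max? l id with
  | none => exact absurd ((PySem.List.max?_eq_none_iff l id).mp hm) h
  | some v => exact ⟨v, rfl⟩

theorem pv_max?_eq (l : List String) (m : String) (h1 : m ∈ l) (h2 : ∀ y ∈ l, y ≤ m) :
    PySem.List.max? l id = some m := by
  obtain ⟨v, hv⟩ := pv_max?_isSome l (List.ne_nil_of_mem h1)
  rw [hv]
  have hm := PySem.List.max?_isMax hv m h1
  have := h2 v (PySem.List.max?_mem hv)
  simp only [id] at hm
  exact congrArg some (le_antisymm this hm)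

theorem pv_max?_append (l : List String) (x M : String)
    (h : PySem.List.max? l id = some M) :
    PySem.List.max? (l ++ [x]) id = some (if M < x then x else M) := by
  rw [PySem.List.max?, List.foldl_append, ← PySem.List.max?, h]
  show (if id M < id x then some x else some M) = some (if M < x then x else M)
  by_cases hx : M < x <;> simp [hx]

theorem pv_index?_append_left (l l' : List String) (v : String) (p : Nat)
    (h : PySem.List.index? l v = some p) : PySem.List.index? (l ++ l') v = some p := by
  induction l generalizing p with
  | nil => simp [PySem.List.index?] at h
  | cons a t ih =>
      rw [PySem.List.index?, List.cons_append, List.idxOf?_cons] at *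
      by_cases ha : (a == v) = true
      · simpa [ha] using h
      · simp only [ha] at h ⊢
        obtain ⟨q, hq, rfl⟩ := Option.map_eq_some_iff.1 h
        rw [PySem.List.index?] at ih
        rw [ih q hq]
        rfl

theorem pv_index?_append_self (l : List String) (v : String) (h : v ∉ l) :
    PySem.List.index? (l ++ [v]) v = some l.length := by
  induction l with
  | nil => simp [PySem.List.index?, List.idxOf?_cons]
  | cons a t ih =>
      have ha : (a == v) = false := by
        rw [beq_eq_false_iff_ne]; rintro rfl; exact h (List.mem_cons_self)
      rw [PySem.List.index?, List.cons_append, List.idxOf?_cons, ha]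
      simp only [Bool.false_eq_true, if_false]
      rw [PySem.List.index?] at ih
      rw [ih (fun hm => h (List.mem_cons_of_mem _ hm))]
      rfl

def pvDq (kmer : Int → String) (lo hi : Int) : List (String × Int) :=
  (PySem.List.pyRange lo (hi + 1)).foldl (pvBuild kmer) []


theorem pvPop_headD (x : String) (d : List (String × Int)) (z : String × Int)
    (h : pvPop x d ≠ []) : (pvPop x d).headD z = d.headD z := by
  cases d with
  | nil => simp [pvPop] at h
  | cons a t =>
      rw [pvPop_cons] at h ⊢
      by_cases hp : pvPop x t = []
      · rw [if_pos hp] at h ⊢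
        by_cases hk : a.1 < x
        · rw [if_pos hk] at h; exact absurd rfl h
        · rw [if_neg hk]; rfl
      · rw [if_neg hp]; rfl

theorem pv_headD_append (l l' : List (String × Int)) (z : String × Int) (h : l ≠ []) :
    (l ++ l').headD z = l.headD z := by
  cases l with
  | nil => exact absurd rfl h
  | cons a t => rfl

theorem pv_pyRange_nil (a b : Int) (h : b ≤ a) : PySem.List.pyRange a b = [] := by
  simp [PySem.List.pyRange]; omega

theorem pvDq_base (kmer : Int → String) (lo : Int) : pvDq kmer lo lo = [(kmer lo, lo)] := by
  rw [pvDq, PySem.List.pyRange_one_cons (by omega : lo < lo + 1),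
    pv_pyRange_nil (lo + 1) (lo + 1) le_rfl]
  simp [pvBuild, pvPop]

theorem pvDq_rec (kmer : Int → String) (lo hi : Int) (h : lo ≤ hi + 1) :
    pvDq kmer lo (hi + 1) = pvPop (kmer (hi + 1)) (pvDq kmer lo hi) ++ [(kmer (hi + 1), hi + 1)] := by
  rw [pvDq, PySem.List.pyRange_one_succ_right h, List.foldl_append]
  rfl

theorem pvDq_nonempty (kmer : Int → String) (lo hi : Int) (h : lo ≤ hi) :
    pvDq kmer lo hi ≠ [] := by
  have h2 : hi - 1 + 1 = hi := by omega
  have := pvDq_rec kmer lo (hi - 1) (by omega)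
  rw [h2] at this
  rw [this]
  simp

theorem pvDq_split (kmer : Int → String) (lo hi : Int) (h : lo ≤ hi) :
    pvDq kmer lo hi = (kmer lo, lo) :: pvDq kmer (lo + 1) hi ∨
      (pvDq kmer lo hi = pvDq kmer (lo + 1) hi ∧ ((pvDq kmer lo hi).headD ("", 0)).2 ≠ lo) := by
  induction hi, h using Int.le_induction with
  | base =>
      left
      rw [pvDq_base, pvDq, pv_pyRange_nil _ _ (by omega)]
      rfl
  | succ hi hle ih =>
      have hrecL := pvDq_rec kmer lo hi (by omega)
      have hrecR := pvDq_rec kmer (lo + 1) hi (by omega)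
      rcases ih with hL | ⟨hR, hhd⟩
      · -- pvDq lo hi = (kmer lo, lo) :: rest, rest = pvDq (lo+1) hi
        rw [hL, pvPop_cons] at hrecL
        by_cases hp : pvPop (kmer (hi + 1)) (pvDq kmer (lo + 1) hi) = []
        · rw [if_pos hp] at hrecL
          by_cases hk : kmer lo < kmer (hi + 1)
          · right
            rw [if_pos hk] at hrecL
            constructor
            · rw [hrecL, hrecR, hp]
            · rw [hrecL]; simp only [List.nil_append, List.headD_cons]; omega
          · left
            rw [if_neg hk] at hrecL
            rw [hrecL, hrecR, hp]; rfl
        · rw [if_neg hp] at hrecL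
          left
          rw [hrecL, hrecR]; rfl
      · -- equal deques, head index ≠ lo
        right
        rw [hR] at hrecL
        refine ⟨by rw [hrecL, hrecR], ?_⟩
        rw [hrecL]
        by_cases hp : pvPop (kmer (hi + 1)) (pvDq kmer (lo + 1) hi) = []
        · rw [hp]; simp; omega
        · rw [pv_headD_append _ _ _ hp, pvPop_headD _ _ _ hp, ← hR]
          exact hhd

theorem pv_pyRange_len (a b : Int) (h : a ≤ b) :
    ((PySem.List.pyRange a b).length : Int) = b - a := by
  simp [PySem.List.pyRange]
  omega

theorem pvDq_spec (kmer : Int → String) (lo hi : Int) (h : lo ≤ hi) :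
    ∃ (M : String) (p : Nat),
      PySem.List.max? ((PySem.List.pyRange lo (hi + 1)).map kmer) id = some M ∧
      PySem.List.index? ((PySem.List.pyRange lo (hi + 1)).map kmer) M = some p ∧
      lo + (p : Int) ≤ hi ∧ kmer (lo + (p : Int)) = M ∧
      (pvDq kmer lo hi).headD ("", 0) = (M, lo + (p : Int)) ∧
      ∀ e ∈ pvDq kmer lo hi, e.1 = kmer e.2 ∧ lo ≤ e.2 ∧ e.2 ≤ hi ∧ e.1 ≤ M := by
  induction hi, h using Int.le_induction with
  | base =>
      have hwin : (PySem.List.pyRange lo (lo + 1)).map kmer = [kmer lo] := by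
        rw [PySem.List.pyRange_one_cons (by omega : lo < lo + 1),
          pv_pyRange_nil _ _ le_rfl]
        rfl
      refine ⟨kmer lo, 0, ?_, ?_, by omega, by norm_num, ?_, ?_⟩
      · rw [hwin]; exact pv_max?_eq _ _ List.mem_cons_self (by intro y hy; simp at hy; rw [hy])
      · rw [hwin]; simp [PySem.List.index?, List.idxOf?_cons]
      · rw [pvDq_base]; norm_num
      · rw [pvDq_base]; intro e he; simp at he; subst he; simp
  | succ hi hle ih =>
      obtain ⟨M, p, hmax, hidx, hple, hk, hhd, hmem⟩ := ih
      have hwin : (PySem.List.pyRange lo (hi + 1 + 1)).map kmer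
          = (PySem.List.pyRange lo (hi + 1)).map kmer ++ [kmer (hi + 1)] := by
        rw [PySem.List.pyRange_one_succ_right (by omega : lo ≤ hi + 1), List.map_append]
        rfl
      have hrec := pvDq_rec kmer lo hi (by omega)
      by_cases hx : M < kmer (hi + 1)
      · -- new strict maximum: the deque collapses to the new element
        have hlen : ((((PySem.List.pyRange lo (hi + 1)).map kmer).length : Nat) : Int)
            = hi + 1 - lo := by
          rw [List.length_map]; exact pv_pyRange_len _ _ (by omega)
        refine ⟨kmer (hi + 1), ((PySem.List.pyRange lo (hi + 1)).map kmer).length,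
          ?_, ?_, by omega, by rw [show lo + ((((PySem.List.pyRange lo (hi + 1)).map kmer).length : Nat) : Int) = hi + 1 by omega], ?_, ?_⟩
        · rw [hwin, pv_max?_append _ _ _ hmax, if_pos hx]
        · rw [hwin]
          refine pv_index?_append_self _ _ (fun hm => ?_)
          exact absurd (PySem.List.max?_isMax hmax _ hm) (by simpa [id] using not_le.mpr hx)
        · have hpop : pvPop (kmer (hi + 1)) (pvDq kmer lo hi) = [] :=
            pvPop_all _ _ (fun e he => lt_of_le_of_lt (hmem e he).2.2.2 hx)
          rw [hrec, hpop, List.nil_append, List.headD_cons]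
          congr 1
          omega
        · have hpop : pvPop (kmer (hi + 1)) (pvDq kmer lo hi) = [] :=
            pvPop_all _ _ (fun e he => lt_of_le_of_lt (hmem e he).2.2.2 hx)
          rw [hrec, hpop, List.nil_append]
          intro e he
          simp at he
          subst he
          exact ⟨rfl, by omega, by omega, le_rfl⟩
      · -- old maximum survives at the front
        have hne := pvDq_nonempty kmer lo hi hle
        obtain ⟨a, t, hat⟩ := List.exists_cons_of_ne_nil hne
        have ha : a = (M, lo + (p : Int)) := by rw [hat] at hhd; exact hhd
        have hpop : pvPop (kmer (hi + 1)) (pvDq kmer lo hi)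
            = a :: pvPop (kmer (hi + 1)) t := by
          rw [hat]; exact pvPop_head _ _ _ (by rw [ha]; exact hx)
        refine ⟨M, p, ?_, ?_, by omega, hk, ?_, ?_⟩
        · rw [hwin, pv_max?_append _ _ _ hmax, if_neg hx]
        · rw [hwin]; exact pv_index?_append_left _ _ _ _ hidx
        · rw [hrec, hpop, List.cons_append, List.headD_cons, ha]
        · rw [hrec, hpop]
          intro e he
          rcases List.mem_append.1 he with hL | hR
          · rcases List.mem_cons.1 hL with heq | hmm
            · have := hmem a (by rw [hat]; exact List.mem_cons_self)
              rw [heq]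
              exact ⟨this.1, this.2.1, by omega, this.2.2.2⟩
            · have hmem' : e ∈ pvDq kmer lo hi := by
                rw [hat]
                exact List.mem_cons_of_mem _ (pvPop_mem _ _ _ hmm)
              have := hmem e hmem'
              exact ⟨this.1, this.2.1, by omega, this.2.2.2⟩
          · rw [List.mem_singleton] at hR
            subst hR
            exact ⟨rfl, by omega, by omega, not_lt.mp hx⟩

theorem pv_sim (seq : String) (k_size w : Int) (hw : 0 ≤ w)
    (M0 : String)
    (h0 : PySem.List.max? ((PySem.List.pyRange 0 (w + 1)).map (pvKmer seq k_size)) id = some M0)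
    (t : Int) (ht : w + 1 ≤ t) :
    ∃ (M : String) (mins : List (String × Int)),
      PySem.List.max? ((PySem.List.pyRange (t - 1 - w) t).map (pvKmer seq k_size)) id = some M ∧
      (PySem.List.pyRange (w + 1) t).foldl (pvStepA seq k_size w)
        ((PySem.List.pyRange 0 (w + 1)).map (pvKmer seq k_size), M0,
          [(M0, ((PySem.List.index? ((PySem.List.pyRange 0 (w + 1)).map (pvKmer seq k_size)) M0).getD 0 : Int))])
        = ((PySem.List.pyRange (t - 1 - w) t).map (pvKmer seq k_size), M, mins) ∧
      (PySem.List.pyRange (w + 1) t).foldl (pvStepB (pvKmer seq k_size) w)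
        ((pvDq (pvKmer seq k_size) 0 w).reverse, (pvDq (pvKmer seq k_size) 0 w).headD ("", 0),
          [(pvDq (pvKmer seq k_size) 0 w).headD ("", 0)])
        = ((pvDq (pvKmer seq k_size) (t - 1 - w) (t - 1)).reverse,
            (pvDq (pvKmer seq k_size) (t - 1 - w) (t - 1)).headD ("", 0), mins) := by
  set kmer := pvKmer seq k_size with hkmer
  induction t, ht using Int.le_induction with
  | base =>
      have e1 : w + 1 - 1 - w = (0 : Int) := by omega
      have e2 : w + 1 - 1 = w := by omega
      rw [pv_pyRange_nil (w + 1) (w + 1) le_rfl, e1, e2]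
      simp only [List.foldl_nil]
      obtain ⟨M, p, hmax, hidx, _, hk, hhd, _⟩ := pvDq_spec kmer 0 w hw
      have hMM0 : M = M0 := Option.some_inj.mp (hmax.symm.trans h0)
      subst hMM0
      refine ⟨M, [(M, (p : Int))], hmax, ?_, ?_⟩
      · rw [hidx]; rfl
      · rw [hhd]; norm_num
  | succ t ht ih =>
      obtain ⟨M, mins, hmax, hA, hB⟩ := ih
      have e3 : t - 1 + 1 = t := by omega
      have e4 : t + 1 - 1 - w = t - 1 - w + 1 := by omega
      have e5 : t + 1 - 1 = t := by omega
      rw [e4, e5]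
      rw [PySem.List.pyRange_one_succ_right ht, List.foldl_append, List.foldl_append, hA, hB,
        List.foldl_cons, List.foldl_cons, List.foldl_nil, List.foldl_nil]
      -- spec of the old window [lo, t-1]
      obtain ⟨M', p, hmax', hidx', hple', hk', hhd', hmem'⟩ :=
        pvDq_spec kmer (t - 1 - w) (t - 1) (by omega)
      rw [e3] at hmax' hidx'
      have hMM : M' = M := Option.some_inj.mp (hmax'.symm.trans hmax)
      rw [hMM] at hmax' hidx' hk' hhd' hmem'
      -- spec of the new window [lo+1, t]
      obtain ⟨N, q, hmaxN, hidxN, hpleN, hkN, hhdN, hmemN⟩ :=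
        pvDq_spec kmer (t - 1 - w + 1) t (by omega)
      -- window decomposition
      have hcons : (PySem.List.pyRange (t - 1 - w) t).map kmer
          = kmer (t - 1 - w) :: (PySem.List.pyRange (t - 1 - w + 1) t).map kmer := by
        rw [PySem.List.pyRange_one_cons (by omega : t - 1 - w < t)]; rfl
      have hwin' : (PySem.List.pyRange (t - 1 - w + 1) t).map kmer ++ [kmer t]
          = (PySem.List.pyRange (t - 1 - w + 1) (t + 1)).map kmer := by
        rw [PySem.List.pyRange_one_succ_right (by omega : t - 1 - w + 1 ≤ t), List.map_append]
        rfl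
      -- deque recurrence for the new window
      have hrecN : pvDq kmer (t - 1 - w + 1) t
          = pvPop (kmer t) (pvDq kmer (t - 1 - w + 1) (t - 1)) ++ [(kmer t, t)] := by
        have := pvDq_rec kmer (t - 1 - w + 1) (t - 1) (by omega)
        rw [e3] at this
        exact this
      by_cases hM : M = kmer (t - 1 - w)
      · -- the front of the window is the (leftmost) maximum: it expires now
        have hp0 : (p : Int) = 0 := by
          have hidx0 : PySem.List.index? ((PySem.List.pyRange (t - 1 - w) t).map kmer) M
              = some 0 := by
            rw [hcons, PySem.List.index?, List.idxOf?_cons,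
              if_pos (beq_iff_eq.mpr hM.symm)]
          have hpn : p = 0 := Option.some_inj.mp (hidx'.symm.trans hidx0)
          exact_mod_cast congrArg (Nat.cast : Nat → Int) hpn
        -- A takes the recompute branch
        have hAstep : pvStepA seq k_size w ((PySem.List.pyRange (t - 1 - w) t).map kmer, M, mins) t
            = ((PySem.List.pyRange (t - 1 - w + 1) (t + 1)).map kmer, N,
                mins ++ [(N, ((q : Int) + t - w))]) := by
          rw [pvStepA]
          rw [if_pos (by rw [hcons]; exact beq_iff_eq.mpr hM)]
          have htl : ((PySem.List.pyRange (t - 1 - w) t).map kmer, M, mins).1.tail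
              ++ [pvKmer seq k_size t]
              = (PySem.List.pyRange (t - 1 - w + 1) (t + 1)).map kmer := by
            rw [hcons, ← hkmer]
            exact hwin'
          rw [htl, hmaxN]
          dsimp only
          rw [hidxN]
          rfl
        -- B: the expired front is popped
        have hsplit := pvDq_split kmer (t - 1 - w) (t - 1) (by omega)
        have htail : (pvDq kmer (t - 1 - w) (t - 1)).tail = pvDq kmer (t - 1 - w + 1) (t - 1) := by
          rcases hsplit with hL | ⟨_, hhd2⟩
          · rw [hL]; rfl
          · rw [hhd'] at hhd2; simp at hhd2; omega
        have hBstep : pvStepB kmer w ((pvDq kmer (t - 1 - w) (t - 1)).reverse,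
              (pvDq kmer (t - 1 - w) (t - 1)).headD ("", 0), mins) t
            = ((pvDq kmer (t - 1 - w + 1) t).reverse,
                (pvDq kmer (t - 1 - w + 1) t).headD ("", 0),
                mins ++ [(N, t - 1 - w + 1 + (q : Int))]) := by
          rw [pvStepB]
          rw [if_pos (by rw [hhd']; simp; omega)]
          have hr : ((kmer t, t) : String × Int)
              :: pvPopR (kmer t) ((pvDq kmer (t - 1 - w) (t - 1)).reverse).dropLast
              = (pvDq kmer (t - 1 - w + 1) t).reverse := by
            rw [pv_dropLast_reverse, htail, pvPopR_reverse, hrecN, List.reverse_append]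
            rfl
          dsimp only
          rw [hr, pv_getLastD_reverse, hhdN]
        refine ⟨N, mins ++ [(N, (q : Int) + t - w)], hmaxN, hAstep, ?_⟩
        rw [hBstep]
        have : t - 1 - w + 1 + (q : Int) = (q : Int) + t - w := by omega
        rw [this]
      · -- the old maximum is still strictly inside the window
        have hp0 : (p : Int) ≠ 0 := by
          intro hp
          rw [hp] at hk'
          exact hM (by rw [← hk']; norm_num)
        have hsplit := pvDq_split kmer (t - 1 - w) (t - 1) (by omega)
        have hEq : pvDq kmer (t - 1 - w) (t - 1) = pvDq kmer (t - 1 - w + 1) (t - 1) := by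
          rcases hsplit with hL | ⟨hR, _⟩
          · rw [hL] at hhd'
            simp at hhd'
            exact absurd hhd'.2.symm (by omega)
          · exact hR
        have hdq2 : pvPop (kmer t) (pvDq kmer (t - 1 - w) (t - 1)) ++ [(kmer t, t)]
            = pvDq kmer (t - 1 - w + 1) t := by
          rw [hEq, ← hrecN]
        have hr : ((kmer t, t) : String × Int)
            :: pvPopR (kmer t) (pvDq kmer (t - 1 - w) (t - 1)).reverse
            = (pvDq kmer (t - 1 - w + 1) t).reverse := by
          rw [pvPopR_reverse, ← hdq2, List.reverse_append]
          rfl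
        by_cases hlt : M < kmer t
        · -- a strictly larger k-mer arrives: it becomes the new maximum
          have hpop : pvPop (kmer t) (pvDq kmer (t - 1 - w) (t - 1)) = [] :=
            pvPop_all _ _ (fun e he => lt_of_le_of_lt (hmem' e he).2.2.2 hlt)
          have hmaxT : PySem.List.max? ((PySem.List.pyRange (t - 1 - w + 1) (t + 1)).map kmer) id
              = some (kmer t) := by
            apply pv_max?_eq
            · exact List.mem_map_of_mem (PySem.List.mem_pyRange_one.mpr (by omega))
            · intro y hy
              obtain ⟨j, hj, rfl⟩ := List.mem_map.1 hy
              have hjb := PySem.List.mem_pyRange_one.1 hj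
              by_cases hjt : j = t
              · rw [hjt]
              · have hmem2 : kmer j ∈ (PySem.List.pyRange (t - 1 - w) t).map kmer :=
                  List.mem_map_of_mem (PySem.List.mem_pyRange_one.mpr (by omega))
                have := PySem.List.max?_isMax hmax _ hmem2
                exact le_trans this (le_of_lt hlt)
          have hfr : (pvDq kmer (t - 1 - w + 1) t).headD ("", 0) = (kmer t, t) := by
            rw [← hdq2, hpop]
            rfl
          have hAstep : pvStepA seq k_size w ((PySem.List.pyRange (t - 1 - w) t).map kmer, M, mins) t
              = ((PySem.List.pyRange (t - 1 - w + 1) (t + 1)).map kmer, kmer t,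
                  mins ++ [(kmer t, t)]) := by
            rw [pvStepA]
            rw [if_neg (by rw [hcons]; simp only [List.headD_cons]; exact fun hc => hM (beq_iff_eq.mp hc))]
            rw [if_pos (by exact hlt)]
            rw [hcons, ← hkmer]
            show ((PySem.List.pyRange (t - 1 - w + 1) t).map kmer ++ [kmer t], _, _) = _
            rw [hwin']
          have hBstep : pvStepB kmer w ((pvDq kmer (t - 1 - w) (t - 1)).reverse,
                (pvDq kmer (t - 1 - w) (t - 1)).headD ("", 0), mins) t
              = ((pvDq kmer (t - 1 - w + 1) t).reverse,
                  (pvDq kmer (t - 1 - w + 1) t).headD ("", 0),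
                  mins ++ [(kmer t, t)]) := by
            rw [pvStepB]
            rw [if_neg (by rw [hhd']; simp; omega)]
            rw [if_pos (by rw [hhd']; exact hlt)]
            dsimp only
            rw [hr, pv_getLastD_reverse, hfr]
          exact ⟨kmer t, mins ++ [(kmer t, t)], hmaxT, hAstep, hBstep⟩
        · -- nothing changes
          have hmaxT : PySem.List.max? ((PySem.List.pyRange (t - 1 - w + 1) (t + 1)).map kmer) id
              = some M := by
            apply pv_max?_eq
            · rw [← hk']
              refine List.mem_map_of_mem (PySem.List.mem_pyRange_one.mpr ?_)
              have : (0 : Int) ≤ (p : Int) := Int.natCast_nonneg p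
              omega
            · intro y hy
              obtain ⟨j, hj, rfl⟩ := List.mem_map.1 hy
              have hjb := PySem.List.mem_pyRange_one.1 hj
              by_cases hjt : j = t
              · rw [hjt]; exact not_lt.mp hlt
              · have hmem2 : kmer j ∈ (PySem.List.pyRange (t - 1 - w) t).map kmer :=
                  List.mem_map_of_mem (PySem.List.mem_pyRange_one.mpr (by omega))
                exact PySem.List.max?_isMax hmax _ hmem2
          have hfr2 : (pvDq kmer (t - 1 - w + 1) t).headD ("", 0)
              = (pvDq kmer (t - 1 - w) (t - 1)).headD ("", 0) := by
            obtain ⟨a, rest, hat⟩ :=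
              List.exists_cons_of_ne_nil (pvDq_nonempty kmer (t - 1 - w) (t - 1) (by omega))
            have ha : a = (M, t - 1 - w + (p : Int)) := by
              have hcopy := hhd'
              rw [hat, List.headD_cons] at hcopy
              exact hcopy
            rw [← hdq2, hat, pvPop_head _ _ _ (by rw [ha]; exact hlt)]
            rfl
          have hAstep : pvStepA seq k_size w ((PySem.List.pyRange (t - 1 - w) t).map kmer, M, mins) t
              = ((PySem.List.pyRange (t - 1 - w + 1) (t + 1)).map kmer, M, mins) := by
            rw [pvStepA]
            rw [if_neg (by rw [hcons]; simp only [List.headD_cons]; exact fun hc => hM (beq_iff_eq.mp hc))]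
            rw [if_neg (by exact hlt)]
            rw [hcons, ← hkmer]
            show ((PySem.List.pyRange (t - 1 - w + 1) t).map kmer ++ [kmer t], _, _) = _
            rw [hwin']
          have hBstep : pvStepB kmer w ((pvDq kmer (t - 1 - w) (t - 1)).reverse,
                (pvDq kmer (t - 1 - w) (t - 1)).headD ("", 0), mins) t
              = ((pvDq kmer (t - 1 - w + 1) t).reverse,
                  (pvDq kmer (t - 1 - w + 1) t).headD ("", 0), mins) := by
            rw [pvStepB]
            rw [if_neg (by rw [hhd']; simp; omega)]
            rw [if_neg (by rw [hhd']; exact hlt)]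
            dsimp only
            rw [hr, hfr2]
          exact ⟨M, mins, hmaxT, hAstep, hBstep⟩

theorem pv_final (seq : String) (k_size w_size : Int) (hPre : k_size ≤ w_size) :
    get_kmer_maximizers seq k_size w_size = get_kmer_maximizers_alt seq k_size w_size := by
  have hw : (0 : Int) ≤ w_size - k_size := by omega
  have hne : ((PySem.List.pyRange 0 (w_size - k_size + 1)).map (pvKmer seq k_size)) ≠ [] := by
    rw [PySem.List.pyRange_one_cons (by omega : (0:Int) < w_size - k_size + 1)]
    simp
  obtain ⟨M0, h0⟩ := pv_max?_isSome _ hne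
  have hdq0 : (PySem.List.pyRange 0 (w_size - k_size + 1)).foldl (pvBuildR (pvKmer seq k_size)) []
      = (pvDq (pvKmer seq k_size) 0 (w_size - k_size)).reverse := by
    have := pv_foldl_buildR (pvKmer seq k_size) (PySem.List.pyRange 0 (w_size - k_size + 1)) []
    rw [List.reverse_nil] at this
    rw [this, pvDq]
  have hAdef : get_kmer_maximizers seq k_size w_size
      = ((PySem.List.pyRange (w_size - k_size + 1) (PySem.Str.len seq - k_size)).foldl
          (pvStepA seq k_size (w_size - k_size))
          ((PySem.List.pyRange 0 (w_size - k_size + 1)).map (pvKmer seq k_size), M0,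
            [(M0, ((PySem.List.index? ((PySem.List.pyRange 0 (w_size - k_size + 1)).map (pvKmer seq k_size)) M0).getD 0 : Int))])).2.2 := by
    simp only [get_kmer_maximizers, h0]
  have hBdef : get_kmer_maximizers_alt seq k_size w_size
      = ((PySem.List.pyRange (w_size - k_size + 1) (PySem.Str.len seq - k_size)).foldl
          (pvStepB (pvKmer seq k_size) (w_size - k_size))
          ((pvDq (pvKmer seq k_size) 0 (w_size - k_size)).reverse,
            (pvDq (pvKmer seq k_size) 0 (w_size - k_size)).headD ("", 0),
            [(pvDq (pvKmer seq k_size) 0 (w_size - k_size)).headD ("", 0)])).2.2 := by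
    simp only [get_kmer_maximizers_alt, hdq0, pv_getLastD_reverse]
  rw [hAdef, hBdef]
  by_cases hn : w_size - k_size + 1 ≤ PySem.Str.len seq - k_size
  · obtain ⟨M, mins, _, hSA, hSB⟩ :=
      pv_sim seq k_size (w_size - k_size) hw M0 h0 (PySem.Str.len seq - k_size) hn
    rw [hSA, hSB]
  · rw [pv_pyRange_nil (w_size - k_size + 1) (PySem.Str.len seq - k_size) (by omega)]
    simp only [List.foldl_nil]
    obtain ⟨M, p, hmax, hidx, _, _, hhd, _⟩ := pvDq_spec (pvKmer seq k_size) 0 (w_size - k_size) hw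
    have hMM : M = M0 := Option.some_inj.mp (hmax.symm.trans h0)
    subst hMM
    rw [hidx, hhd]
    norm_num

-- ===== VERDICT (by name: the statement is the Claim_ definition above) =====
theorem get_kmer_maximizers_spec : Claim_equal_get_kmer_maximizers := by
  intro seq k_size w_size _ hPre
  unfold Spec_get_kmer_maximizers
  exact pv_final seq k_size w_size hPre
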